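-- pv_equiv track=rewrite | github.com/rhulha/EasyScript | easyscript/easyscript.py | _parse_statements
-- ===== SOURCE A (Python) =====
-- from typing import Any, Dict, List, Union, Optional
--
-- def _parse_statements(code: str) -> List[str]:
--     """Parse statements from code, properly handling string literals that may contain newlines"""
--     statements = []
--     current_statement = ""
--     in_string = False
--     escape_next = False
--     i = 0
--
--     while i < len(code):
--         char = code[i]
--
--         if escape_next:
--             current_statement += char
--             escape_next = False
--         elif char == '\\' and in_string:
--             current_statement += char
--             escape_next = True
--         elif char == '"':
--             current_statement += char
--             in_string = not in_string
--         elif char == '\n':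
--             if in_string:
--                 # Newline inside string literal - part of the string
--                 current_statement += char
--             else:
--                 # Newline outside string - end of statement
--                 stmt = current_statement.strip()
--                 if stmt and not stmt.startswith('#'):
--                     statements.append(stmt)
--                 current_statement = ""
--         else:
--             current_statement += char
--
--         i += 1
--
--     # Add the final statement if there is one
--     stmt = current_statement.strip()
--     if stmt and not stmt.startswith('#'):
--         statements.append(stmt)
--
--     return statements
-- ===== SOURCE B (Python) =====
-- def _parse_statements(code: str):
--     """Token scanner: consume whole string literals and plain runs, split on bare newlines."""
--     statements = []
--     parts = []
--     i = 0
--     n = len(code)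
--     while i < n:
--         c = code[i]
--         if c == '"':
--             j = i + 1
--             while j < n:
--                 if code[j] == '\\':
--                     j += 2
--                 elif code[j] == '"':
--                     j += 1
--                     break
--                 else:
--                     j += 1
--             parts.append(code[i:j])
--             i = j
--         elif c == '\n':
--             stmt = ''.join(parts).strip()
--             if stmt and not stmt.startswith('#'):
--                 statements.append(stmt)
--             parts = []
--             i += 1
--         else:
--             j = i + 1
--             while j < n and code[j] != '"' and code[j] != '\n':
--                 j += 1
--             parts.append(code[i:j])
--             i = j
--     stmt = ''.join(parts).strip()
--     if stmt and not stmt.startswith('#'):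
--         statements.append(stmt)
--     return statements
-- ===== Notes on version B (the rewrite author's own statement) =====
-- stated objective: faster
-- what changed: Replaces A's per-character state machine (in_string/escape_next flags, one char appended to the growing statement string per step) with a token scanner that consumes a whole string literal (inner escape-skipping scan) or a whole plain run per step as slices, joining them only when a statement closes on a bare newline.
import Mathlib
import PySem

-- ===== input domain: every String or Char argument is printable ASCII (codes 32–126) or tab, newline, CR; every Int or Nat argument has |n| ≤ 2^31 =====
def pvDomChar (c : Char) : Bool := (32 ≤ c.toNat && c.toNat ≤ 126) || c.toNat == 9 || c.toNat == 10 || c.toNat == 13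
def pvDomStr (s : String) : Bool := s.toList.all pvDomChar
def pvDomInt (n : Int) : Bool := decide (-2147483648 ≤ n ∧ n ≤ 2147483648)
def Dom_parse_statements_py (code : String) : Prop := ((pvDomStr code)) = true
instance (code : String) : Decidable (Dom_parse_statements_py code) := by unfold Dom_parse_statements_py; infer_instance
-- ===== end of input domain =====

-- B replaces A's per-character in_string/escape state machine (which grows the current
-- statement one character at a time) by a token scanner that consumes whole string
-- literals / plain runs as slices; measured faster in a timing run.

-- ===== PORT A =====
-- flush of the accumulated statement (same literal code in A and in Source B, ported once):
-- stmt = current.strip(); append if nonempty and not '#'-comment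
def pvFlushA (stmts : List String) (cur : List Char) : List String :=
  let stmt := PySem.Str.strip (String.mk cur)
  if stmt ≠ "" ∧ ¬ (PySem.Str.startswith stmt "#" = true) then stmts ++ [stmt] else stmts

-- the while-loop of A, one character per step, state (statements, current_statement, in_string, escape_next)
def pvALoop : List Char → List String → List Char → Bool → Bool → List String
  | [], stmts, cur, _, _ => pvFlushA stmts cur
  | c :: rest, stmts, cur, inStr, esc =>
    if esc then pvALoop rest stmts (cur ++ [c]) inStr false
    else if c = '\\' ∧ inStr then pvALoop rest stmts (cur ++ [c]) inStr true
    else if c = '"' then pvALoop rest stmts (cur ++ [c]) (!inStr) esc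
    else if c = '\n' then
      (if inStr then pvALoop rest stmts (cur ++ [c]) inStr esc
       else pvALoop rest (pvFlushA stmts cur) [] inStr esc)
    else pvALoop rest stmts (cur ++ [c]) inStr esc

def parse_statements_py (code : String) : List String :=
  pvALoop code.toList [] [] false false

-- ===== PORT B =====
-- inner scan of Source B's string-literal loop: chars after the opening quote up to and including
-- the closing quote (escape skips the next char), plus the rest of the input
def pvScanStr : List Char → List Char × List Char
  | [] => ([], [])
  | c :: rest =>
    if c = '\\' then
      match rest with
      | [] => ([c], [])
      | d :: rest' => let p := pvScanStr rest'; (c :: d :: p.1, p.2)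
    else if c = '"' then ([c], rest)
    else let p := pvScanStr rest; (c :: p.1, p.2)
termination_by l => l.length

-- inner scan of Source B's plain-run loop: maximal run of chars that are neither '"' nor '\n'
def pvScanPlain : List Char → List Char × List Char
  | [] => ([], [])
  | c :: rest =>
    if c = '"' ∨ c = '\n' then ([], c :: rest)
    else let p := pvScanPlain rest; (c :: p.1, p.2)

theorem pvScanStr_len (l : List Char) : (pvScanStr l).2.length ≤ l.length := by
  induction l using pvScanStr.induct with
  | case1 => rw [pvScanStr.eq_def]
  | case2 => simp [pvScanStr.eq_def]
  | case3 d rest' ih =>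
    have h : pvScanStr ('\\' :: d :: rest') = ('\\' :: d :: (pvScanStr rest').1, (pvScanStr rest').2) := by
      rw [pvScanStr.eq_def]; simp
    rw [h]; simp only [List.length_cons]
    exact Nat.le_trans ih (by omega)
  | case4 rest' h => rw [pvScanStr.eq_def]; simp
  | case5 d rest' h1 h2 ih =>
    have h : pvScanStr (d :: rest') = (d :: (pvScanStr rest').1, (pvScanStr rest').2) := by
      rw [pvScanStr.eq_def]; simp [h1, h2]
    rw [h]; simp only [List.length_cons]
    exact Nat.le_trans ih (by omega)

theorem pvScanPlain_len (l : List Char) : (pvScanPlain l).2.length ≤ l.length := by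
  induction l with
  | nil => simp [pvScanPlain]
  | cons c rest ih =>
    by_cases h : c = '"' ∨ c = '\n'
    · simp [pvScanPlain, h]
    · simp only [pvScanPlain, if_neg h, List.length_cons]
      exact Nat.le_succ_of_le ih

-- the outer while-loop of Source B: one token (string literal / newline / plain run) per step
def pvBLoop : List Char → List Char → List String → List String
  | [], parts, acc => pvFlushA acc parts
  | c :: rest, parts, acc =>
    if c = '"' then
      let p := pvScanStr rest
      pvBLoop p.2 (parts ++ c :: p.1) acc
    else if c = '\n' then pvBLoop rest [] (pvFlushA acc parts)
    else
      let p := pvScanPlain rest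
      pvBLoop p.2 (parts ++ c :: p.1) acc
termination_by l _ _ => l.length
decreasing_by
  · exact Nat.lt_succ_of_le (pvScanStr_len rest)
  · simp
  · exact Nat.lt_succ_of_le (pvScanPlain_len rest)

def parse_statements_py_alt (code : String) : List String :=
  pvBLoop code.toList [] []

-- ===== PRECONDITION & SPEC =====
def Spec_parse_statements_py (code : String) (out : List String) : Prop := out = parse_statements_py_alt code
instance (code : String) (out : List String) : Decidable (Spec_parse_statements_py code out) := by unfold Spec_parse_statements_py; infer_instance

-- ===== CLAIM (what is proved, stated in full; the proofs are below) =====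
def Claim_equal_parse_statements_py : Prop := ∀ (code : String), Dom_parse_statements_py code → Spec_parse_statements_py code (parse_statements_py code)

-- ===== LEMMAS AND PROOFS =====

-- in string mode, A's loop consumes exactly the characters pvScanStr yields
theorem pvScanStr_quote (rest : List Char) : pvScanStr ('"' :: rest) = (['"'], rest) := by
  rw [pvScanStr.eq_def]; simp

theorem pvScanStr_esc (d : Char) (rest : List Char) :
    pvScanStr ('\\' :: d :: rest) = ('\\' :: d :: (pvScanStr rest).1, (pvScanStr rest).2) := by
  rw [pvScanStr.eq_def]; simp

theorem pvScanStr_other (d : Char) (rest : List Char) (h1 : ¬ d = '\\') (h2 : ¬ d = '"') :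
    pvScanStr (d :: rest) = (d :: (pvScanStr rest).1, (pvScanStr rest).2) := by
  rw [pvScanStr.eq_def]; simp [h1, h2]

-- in string mode, A's loop consumes exactly the characters pvScanStr yields
theorem pvA_string_mode (l : List Char) : ∀ stmts cur,
    pvALoop l stmts cur true false
      = pvALoop (pvScanStr l).2 stmts (cur ++ (pvScanStr l).1) false false := by
  induction l using pvScanStr.induct with
  | case1 => intro stmts cur; rw [pvScanStr.eq_def]; simp [pvALoop]
  | case2 => intro stmts cur; rw [pvScanStr.eq_def]; simp [pvALoop]
  | case3 d rest' ih =>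
    intro stmts cur
    have h1 : pvALoop ('\\' :: d :: rest') stmts cur true false
        = pvALoop rest' stmts (cur ++ ['\\'] ++ [d]) true false := by
      simp [pvALoop]
    rw [h1, ih, pvScanStr_esc]
    simp
  | case4 rest' h =>
    intro stmts cur
    rw [pvScanStr_quote]
    simp [pvALoop]
  | case5 d rest' h1 h2 ih =>
    intro stmts cur
    have hn : pvALoop (d :: rest') stmts cur true false
        = pvALoop rest' stmts (cur ++ [d]) true false := by
      by_cases hnl : d = '\n' <;> simp [pvALoop, h1, h2, hnl]
    rw [hn, ih, pvScanStr_other d rest' h1 h2]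
    simp

-- a plain run (no '"', no '\n') is consumed by A one char at a time into the current statement
theorem pvA_plain_run (t : List Char) : ∀ r stmts cur,
    (∀ c ∈ t, ¬(c = '"' ∨ c = '\n')) →
    pvALoop (t ++ r) stmts cur false false = pvALoop r stmts (cur ++ t) false false := by
  induction t with
  | nil => intro r stmts cur _; simp
  | cons c t ih =>
    intro r stmts cur h
    have hc := h c (by simp)
    have h1 : c ≠ '"' := fun e => hc (Or.inl e)
    have h2 : c ≠ '\n' := fun e => hc (Or.inr e)
    have step : pvALoop (c :: (t ++ r)) stmts cur false false
        = pvALoop (t ++ r) stmts (cur ++ [c]) false false := by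
      simp [pvALoop, h1, h2]
    simp only [List.cons_append, step]
    rw [ih r stmts (cur ++ [c]) (fun x hx => h x (by simp [hx]))]
    simp

theorem pvScanPlain_spec (l : List Char) :
    l = (pvScanPlain l).1 ++ (pvScanPlain l).2 ∧
      ∀ c ∈ (pvScanPlain l).1, ¬(c = '"' ∨ c = '\n') := by
  induction l with
  | nil => simp [pvScanPlain]
  | cons c rest ih =>
    by_cases h : c = '"' ∨ c = '\n'
    · simp [pvScanPlain, h]
    · simp only [pvScanPlain, if_neg h]
      refine ⟨by simpa using ih.1, ?_⟩
      intro x hx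
      simp only [List.mem_cons] at hx
      rcases hx with rfl | hx
      · exact h
      · exact ih.2 x hx

theorem pv_main : ∀ n (l : List Char) parts acc, l.length ≤ n →
    pvALoop l acc parts false false = pvBLoop l parts acc := by
  intro n
  induction n with
  | zero =>
    intro l parts acc hl
    have : l = [] := List.length_eq_zero_iff.mp (Nat.le_zero.mp hl)
    subst this
    simp only [pvALoop, pvBLoop]
  | succ n ih =>
    intro l parts acc hl
    match l with
    | [] => simp only [pvALoop, pvBLoop]
    | c :: rest =>
      simp only [List.length_cons, Nat.succ_le_succ_iff] at hl
      by_cases hq : c = '"'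
      · subst hq
        have hA : pvALoop ('"' :: rest) acc parts false false
            = pvALoop rest acc (parts ++ ['"']) true false := by simp [pvALoop]
        rw [hA, pvA_string_mode, ih _ _ _ (Nat.le_trans (pvScanStr_len rest) hl)]
        simp [pvBLoop]
      · by_cases hn : c = '\n'
        · subst hn
          have hA : pvALoop ('\n' :: rest) acc parts false false
              = pvALoop rest (pvFlushA acc parts) [] false false := by simp [pvALoop, hq]
          rw [hA, ih _ _ _ hl]
          simp [pvBLoop]
        · obtain ⟨hsplit, hplain⟩ := pvScanPlain_spec rest
          have hA : pvALoop (c :: rest) acc parts false false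
              = pvALoop rest acc (parts ++ [c]) false false := by
            simp [pvALoop, hq, hn]
          rw [hA]
          conv_lhs => rw [hsplit]
          rw [pvA_plain_run _ _ _ _ hplain,
              ih _ _ _ (Nat.le_trans (pvScanPlain_len rest) hl)]
          simp only [pvBLoop, if_neg hq, if_neg hn]
          simp

-- ===== VERDICT (by name: the statement is the Claim_ definition above) =====
theorem parse_statements_py_spec : Claim_equal_parse_statements_py := by
  intro code _
  unfold Spec_parse_statements_py parse_statements_py parse_statements_py_alt
  exact pv_main code.toList.length code.toList [] [] le_rfl
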